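-- pv_equiv track=rewrite | github.com/JungChaeMoon/Algorithm | scoville.py | solution
-- ===== SOURCE A (Python) =====
-- import heapq
--
-- def solution(scoville, K):
--     answer = 0
--     _heapq = []
--     for num in scoville:
--         heapq.heappush(_heapq, num)
--
--     while len(_heapq) > 2:
--         flag = True
--         for num in _heapq:
--             if num < K:
--                 flag = False
--                 break
--         if flag:
--             break
--         answer += 1
--         first = heapq.heappop(_heapq)
--         second = heapq.heappop(_heapq)
--         new_scoville = first + (second * 2)
--         heapq.heappush(_heapq, new_scoville)
--
--     for num in _heapq:
--         if num < K:
--             return -1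
--
--     return answer
-- ===== SOURCE B (Python) =====
-- def solution(scoville, K):
--     # Two-sorted-queues merge instead of a heap: sort once, then every pop of the global
--     # minimum is an O(1) front comparison of two sorted queues -- the unconsumed sorted
--     # input (base[i:]) and the merged bowls in creation order (combined[j:]), which stays
--     # sorted because each merged value a + 2b is built from the two current minima and so
--     # the created values are nondecreasing.
--     base = sorted(scoville)
--     combined = []
--     i = j = 0
--     answer = 0
--     while (len(base) - i) + (len(combined) - j) > 2:
--         # peek the global minimum: the smaller of the two queue fronts
--         if i < len(base) and (j == len(combined) or base[i] <= combined[j]):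
--             a = base[i]
--         else:
--             a = combined[j]
--         if a >= K:
--             break
--         # consume it
--         if i < len(base) and (j == len(combined) or base[i] <= combined[j]):
--             i += 1
--         else:
--             j += 1
--         # consume the second smallest
--         if i < len(base) and (j == len(combined) or base[i] <= combined[j]):
--             b, i = base[i], i + 1
--         else:
--             b, j = combined[j], j + 1
--         combined.append(a + b * 2)
--         answer += 1
--     rest = base[i:] + combined[j:]
--     if rest and min(rest) < K:
--         return -1
--     return answer
-- ===== Notes on version B (the rewrite author's own statement) =====
-- stated objective: alternative
-- what changed: B abandons the heap entirely: it sorts the input once and then merges two sorted queues consumed from the front -- the sorted input and a FIFO of created values, which provably stays sorted because merged values are nondecreasing -- so the global minimum is an O(1) front comparison and each step is O(1), replacing A's heap pushes/pops, its per-iteration membership scan with a flag, and its final scan loop; A's exact stopping rule (never combining the last two bowls) is kept.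
import Mathlib
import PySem

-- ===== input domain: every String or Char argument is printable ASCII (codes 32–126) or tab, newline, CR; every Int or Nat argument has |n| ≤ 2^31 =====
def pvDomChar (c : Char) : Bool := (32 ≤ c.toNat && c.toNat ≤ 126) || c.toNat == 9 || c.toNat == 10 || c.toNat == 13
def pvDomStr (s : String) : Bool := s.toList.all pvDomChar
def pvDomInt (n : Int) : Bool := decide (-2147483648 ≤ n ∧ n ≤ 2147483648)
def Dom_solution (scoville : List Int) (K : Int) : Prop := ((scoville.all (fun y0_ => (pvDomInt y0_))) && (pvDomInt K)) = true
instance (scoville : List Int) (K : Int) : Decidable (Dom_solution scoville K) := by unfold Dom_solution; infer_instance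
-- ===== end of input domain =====

-- B replaces A's heap-plus-rescan loop by one sort and two sorted queues consumed from the
-- front (combined values are appended to the second queue, which provably stays sorted);
-- objective: alternative algorithm (O(1) queue fronts instead of heap ops and scans), same exact results.


-- ===== PORT A =====
-- A calls the library heapq; it is ported by its contract: heappush adds the value to the
-- collection, heappop removes and returns the (first) minimum value.  Every observation A
-- makes of the heap — the values the two heappops return, and whether SOME element is < K
-- in the flag scan and the final scan — depends only on the multiset of values, never on
-- heapq's internal array order, so the port keeps the collection as a plain list in push
-- order and extracts the minimum by a scan (pvPopMin).
def pvPopMin : List Int → Int × List Int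
  | [] => (0, [])          -- never reached: callers pop from a non-empty collection
  | [x] => (x, [])
  | x :: y :: xs =>
    let p := pvPopMin (y :: xs)
    if x ≤ p.1 then (x, y :: xs) else (p.1, x :: p.2)

theorem pvPopMin_perm (l : List Int) (h : l ≠ []) :
    l.Perm ((pvPopMin l).1 :: (pvPopMin l).2) := by
  induction l with
  | nil => simp at h
  | cons x xs ih =>
    cases xs with
    | nil => simp [pvPopMin]
    | cons y ys =>
      simp only [pvPopMin]
      split
      · exact List.Perm.refl _
      · exact ((ih (by simp)).cons x).trans (List.Perm.swap _ _ _)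

theorem pvPopMin_length (l : List Int) (h : l ≠ []) :
    ((pvPopMin l).2).length + 1 = l.length := by
  have := (pvPopMin_perm l h).length_eq
  simpa using this.symm

-- the while loop of A: flag scan (break when no element < K), pop two minima, push combined
def solutionLoop (bag : List Int) (K : Int) (answer : Int) : Int :=
  if hlen : bag.length > 2 then
    if bag.any (fun num => num < K) then
      let first := (pvPopMin bag).1
      let bag1 := (pvPopMin bag).2
      let second := (pvPopMin bag1).1
      let bag2 := (pvPopMin bag1).2
      solutionLoop (bag2 ++ [first + second * 2]) K (answer + 1)
    else
      -- flag: no element < K, break; the final scan then finds none either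
      if bag.any (fun num => num < K) then -1 else answer
  else
    if bag.any (fun num => num < K) then -1 else answer
termination_by bag.length
decreasing_by
  have h1 : bag ≠ [] := by intro h; subst h; simp at hlen
  have e1 := pvPopMin_length bag h1
  have h2 : (pvPopMin bag).2 ≠ [] := by
    intro h
    rw [h] at e1
    simp at e1
    omega
  have e2 := pvPopMin_length (pvPopMin bag).2 h2
  simp only [List.length_append, List.length_cons, List.length_nil]
  omega

def solution (scoville : List Int) (K : Int) : Int :=
  solutionLoop (scoville.foldl (fun h num => h ++ [num]) []) K 0

-- ===== PORT B =====
-- Source B keeps two front-consumed queues: 'base' (the sorted input) and 'combined' (merged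
-- values, appended at the back).  Python consumes them with indices i/j into fixed lists;
-- the port keeps the un-consumed suffixes themselves.  The peek / consume of the smaller
-- queue front becomes pvFrontPop: the value and the two remaining suffixes.
def pvFrontPop (base m : List Int) : Int × List Int × List Int :=
  match base, m with
  | [], [] => (0, [], [])          -- never reached: only called with something remaining
  | x :: bs, [] => (x, bs, [])
  | [], y :: ms => (y, [], ms)
  | x :: bs, y :: ms => if x ≤ y then (x, bs, y :: ms) else (y, x :: bs, ms)

-- 'rest = base[i:] + combined[j:]; if rest and min(rest) < K: return -1; return answer'
def pvAltFinal (base m : List Int) (K answer : Int) : Int :=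
  match PySem.List.min? (base ++ m) (fun x => x) with
  | none => answer
  | some mn => if mn < K then -1 else answer

theorem pvFrontPop_length (base m : List Int) (h : base.length + m.length > 0) :
    (pvFrontPop base m).2.1.length + (pvFrontPop base m).2.2.length + 1
      = base.length + m.length := by
  match base, m with
  | [], [] => simp at h
  | x :: bs, [] => simp [pvFrontPop]
  | [], y :: ms => simp [pvFrontPop]
  | x :: bs, y :: ms =>
    simp only [pvFrontPop]
    split <;> simp <;> omega

def solutionAltLoop (base m : List Int) (K answer : Int) : Int :=
  if hlen : base.length + m.length > 2 then
    if (pvFrontPop base m).1 < K then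
      let p1 := pvFrontPop base m
      let p2 := pvFrontPop p1.2.1 p1.2.2
      solutionAltLoop p2.2.1 (p2.2.2 ++ [p1.1 + p2.1 * 2]) K (answer + 1)
    else pvAltFinal base m K answer
  else pvAltFinal base m K answer
termination_by base.length + m.length
decreasing_by
  have L1 := pvFrontPop_length base m (by omega)
  have L2 := pvFrontPop_length (pvFrontPop base m).2.1 (pvFrontPop base m).2.2 (by omega)
  simp only [List.length_append, List.length_cons, List.length_nil]
  omega

def solution_alt (scoville : List Int) (K : Int) : Int :=
  solutionAltLoop (PySem.List.sorted scoville (fun x => x) false) [] K 0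

-- ===== PRECONDITION & SPEC =====
def Spec_solution (scoville : List Int) (K : Int) (out : Int) : Prop := out = solution_alt scoville K
instance (scoville : List Int) (K : Int) (out : Int) : Decidable (Spec_solution scoville K out) := by unfold Spec_solution; infer_instance

-- ===== CLAIM (what is proved, stated in full; the proofs are below) =====
def Claim_equal_solution : Prop := ∀ (scoville : List Int) (K : Int), Dom_solution scoville K → Spec_solution scoville K (solution scoville K)

-- ===== LEMMAS AND PROOFS =====

theorem pvPopMin_le (l : List Int) (h : l ≠ []) : ∀ y ∈ l, (pvPopMin l).1 ≤ y := by
  induction l with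
  | nil => simp at h
  | cons x xs ih =>
    cases xs with
    | nil => simp [pvPopMin]
    | cons y ys =>
      intro z hz
      have ihz := ih (by simp)
      simp only [pvPopMin]
      split
      · rename_i hle
        rcases List.mem_cons.mp hz with rfl | hz'
        · exact le_refl z
        · exact le_trans hle (ihz z hz')
      · rename_i hgt
        rcases List.mem_cons.mp hz with rfl | hz'
        · exact le_of_lt (lt_of_not_ge hgt)
        · exact ihz z hz'

-- pvFrontPop takes the head of one of the two queues and leaves the other untouched
theorem pvFrontPop_cases (base m : List Int) (h : ¬(base = [] ∧ m = [])) :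
    (base = (pvFrontPop base m).1 :: (pvFrontPop base m).2.1 ∧ (pvFrontPop base m).2.2 = m) ∨
    (m = (pvFrontPop base m).1 :: (pvFrontPop base m).2.2 ∧ (pvFrontPop base m).2.1 = base) := by
  match base, m with
  | [], [] => exact absurd ⟨rfl, rfl⟩ h
  | x :: bs, [] => left; simp [pvFrontPop]
  | [], y :: ms => right; simp [pvFrontPop]
  | x :: bs, y :: ms =>
    simp only [pvFrontPop]
    split
    · left; simp
    · right; simp

theorem pvFrontPop_perm (base m : List Int) (h : ¬(base = [] ∧ m = [])) :
    (base ++ m).Perm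
      ((pvFrontPop base m).1 :: ((pvFrontPop base m).2.1 ++ (pvFrontPop base m).2.2)) := by
  rcases pvFrontPop_cases base m h with ⟨hb, hm⟩ | ⟨hm, hb⟩
  · rw [hm]
    conv_lhs => rw [hb]
    exact List.Perm.refl _
  · rw [hb]
    conv_lhs => rw [hm]
    exact List.perm_middle

theorem sorted_head_le (x : Int) (t : List Int) (h : (x :: t).Pairwise (· ≤ ·)) :
    ∀ z ∈ x :: t, x ≤ z := by
  intro z hz
  rcases List.mem_cons.mp hz with rfl | hz'
  · exact le_refl z
  · exact (List.pairwise_cons.mp h).1 z hz'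

theorem pvFrontPop_isMin (base m : List Int)
    (hb : base.Pairwise (· ≤ ·)) (hm : m.Pairwise (· ≤ ·)) :
    ∀ y ∈ base ++ m, (pvFrontPop base m).1 ≤ y := by
  match base, m with
  | [], [] => simp
  | x :: bs, [] =>
    intro y hy
    simp only [List.append_nil] at hy
    exact sorted_head_le x bs hb y hy
  | [], y :: ms =>
    intro z hz
    simp only [List.nil_append] at hz
    exact sorted_head_le y ms hm z hz
  | x :: bs, y :: ms =>
    intro z hz
    rcases List.mem_append.mp hz with hz' | hz'
    · simp only [pvFrontPop]
      split
      · exact sorted_head_le x bs hb z hz'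
      · rename_i hgt
        exact le_trans (le_of_lt (lt_of_not_ge hgt)) (sorted_head_le x bs hb z hz')
    · simp only [pvFrontPop]
      split
      · rename_i hle
        exact le_trans hle (sorted_head_le y ms hm z hz')
      · exact sorted_head_le y ms hm z hz'

-- A's pop and B's pop return the same value: the minimum of the shared multiset
theorem pop_value_eq (bag base m : List Int) (a : Int) (b1 m1 : List Int)
    (hE : pvFrontPop base m = (a, b1, m1))
    (hperm : bag.Perm (base ++ m)) (hne : ¬(base = [] ∧ m = []))
    (hb : base.Pairwise (· ≤ ·)) (hm : m.Pairwise (· ≤ ·)) :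
    (pvPopMin bag).1 = a := by
  have hc : (base = a :: b1 ∧ m1 = m) ∨ (m = a :: m1 ∧ b1 = base) := by
    have := pvFrontPop_cases base m hne
    rw [hE] at this
    simpa using this
  have hmemF : a ∈ base ++ m := by
    rcases hc with ⟨hbb, _⟩ | ⟨hmm, _⟩
    · exact List.mem_append.mpr (Or.inl (by rw [hbb]; simp))
    · exact List.mem_append.mpr (Or.inr (by rw [hmm]; simp))
  have hbagne : bag ≠ [] := by
    intro h
    subst h
    exact absurd (hperm.mem_iff.mpr hmemF) (by simp)
  have h1 : (pvPopMin bag).1 ≤ a :=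
    pvPopMin_le bag hbagne _ (hperm.mem_iff.mpr hmemF)
  have h2 : a ≤ (pvPopMin bag).1 := by
    have hmemP : (pvPopMin bag).1 ∈ bag :=
      (pvPopMin_perm bag hbagne).mem_iff.mpr (by simp)
    have := pvFrontPop_isMin base m hb hm _ (hperm.mem_iff.mp hmemP)
    rw [hE] at this
    exact this
  omega

theorem pop_rest_perm (bag base m : List Int) (a : Int) (b1 m1 : List Int)
    (hE : pvFrontPop base m = (a, b1, m1))
    (hperm : bag.Perm (base ++ m)) (hne : ¬(base = [] ∧ m = []))
    (hb : base.Pairwise (· ≤ ·)) (hm : m.Pairwise (· ≤ ·)) :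
    (pvPopMin bag).2.Perm (b1 ++ m1) := by
  have hc : (base = a :: b1 ∧ m1 = m) ∨ (m = a :: m1 ∧ b1 = base) := by
    have := pvFrontPop_cases base m hne
    rw [hE] at this
    simpa using this
  have hbagne : bag ≠ [] := by
    intro h
    subst h
    have hmemF : a ∈ base ++ m := by
      rcases hc with ⟨hbb, _⟩ | ⟨hmm, _⟩
      · exact List.mem_append.mpr (Or.inl (by rw [hbb]; simp))
      · exact List.mem_append.mpr (Or.inr (by rw [hmm]; simp))
    exact absurd (hperm.mem_iff.mpr hmemF) (by simp)
  have h' : ((pvPopMin bag).1 :: (pvPopMin bag).2).Perm (a :: (b1 ++ m1)) := by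
    have hFp := pvFrontPop_perm base m hne
    rw [hE] at hFp
    exact (pvPopMin_perm bag hbagne).symm.trans (hperm.trans hFp)
  rw [pop_value_eq bag base m a b1 m1 hE hperm hne hb hm] at h'
  exact h'.cons_inv

theorem solutionLoop_step (bag : List Int) (K answer : Int)
    (h1 : bag.length > 2) (h2 : bag.any (fun num => num < K) = true) :
    solutionLoop bag K answer =
      solutionLoop ((pvPopMin (pvPopMin bag).2).2 ++
        [(pvPopMin bag).1 + (pvPopMin (pvPopMin bag).2).1 * 2]) K (answer + 1) := by
  rw [solutionLoop]
  simp [h1, h2]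

theorem solutionLoop_exit (bag : List Int) (K answer : Int)
    (h1 : bag.length > 2) (h2 : bag.any (fun num => num < K) = false) :
    solutionLoop bag K answer = answer := by
  rw [solutionLoop]
  simp [h1, h2]

theorem solutionLoop_final (bag : List Int) (K answer : Int) (h1 : ¬ bag.length > 2) :
    solutionLoop bag K answer = if bag.any (fun num => num < K) then -1 else answer := by
  rw [solutionLoop]
  simp [h1]

theorem solutionAltLoop_step (base m : List Int) (K answer : Int)
    (h1 : base.length + m.length > 2) (h2 : (pvFrontPop base m).1 < K) :
    solutionAltLoop base m K answer =
      solutionAltLoop (pvFrontPop (pvFrontPop base m).2.1 (pvFrontPop base m).2.2).2.1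
        ((pvFrontPop (pvFrontPop base m).2.1 (pvFrontPop base m).2.2).2.2 ++
          [(pvFrontPop base m).1 + (pvFrontPop (pvFrontPop base m).2.1 (pvFrontPop base m).2.2).1 * 2])
        K (answer + 1) := by
  rw [solutionAltLoop]
  simp [h1, h2]

theorem solutionAltLoop_exit (base m : List Int) (K answer : Int)
    (h2 : ¬ (pvFrontPop base m).1 < K) :
    solutionAltLoop base m K answer = pvAltFinal base m K answer := by
  rw [solutionAltLoop]
  by_cases h1 : base.length + m.length > 2 <;> simp [h1, h2]

theorem solutionAltLoop_final (base m : List Int) (K answer : Int)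
    (h1 : ¬ base.length + m.length > 2) :
    solutionAltLoop base m K answer = pvAltFinal base m K answer := by
  rw [solutionAltLoop]
  simp [h1]

-- A's membership scan, decided by the minimum of the multiset
theorem any_lt_of_mem (bag : List Int) (K x : Int) (hx : x ∈ bag) (h : x < K) :
    bag.any (fun num => num < K) = true :=
  List.any_eq_true.mpr ⟨x, hx, by simpa using h⟩

theorem any_lt_false (bag : List Int) (K x : Int)
    (hlo : ∀ y ∈ bag, x ≤ y) (h : ¬ x < K) :
    bag.any (fun num => num < K) = false := by
  refine List.any_eq_false.mpr ?_
  intro y hy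
  have := hlo y hy
  simp only [decide_eq_true_eq]
  omega

-- reducing pvAltFinal by the value of min?
theorem pvAltFinal_none (base m : List Int) (K answer : Int)
    (h : PySem.List.min? (base ++ m) (fun x => x) = none) :
    pvAltFinal base m K answer = answer := by
  unfold pvAltFinal
  rw [h]

theorem pvAltFinal_some (base m : List Int) (K answer mn : Int)
    (h : PySem.List.min? (base ++ m) (fun x => x) = some mn) :
    pvAltFinal base m K answer = if mn < K then -1 else answer := by
  unfold pvAltFinal
  rw [h]

-- the main invariant: A's bag and B's two sorted queues hold the same multiset;
-- every merged value is ≤ 3·(any other remaining value), which keeps 'combined' sorted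
theorem loop_eq (n : ℕ) : ∀ (bag base m : List Int) (K answer : Int),
    bag.length = n → bag.Perm (base ++ m) →
    base.Pairwise (· ≤ ·) → m.Pairwise (· ≤ ·) →
    (∀ x ∈ m, ∀ y ∈ base, x ≤ 3 * y) →
    m.Pairwise (fun p q => q ≤ 3 * p) →
    solutionLoop bag K answer = solutionAltLoop base m K answer := by
  induction n using Nat.strong_induction_on with
  | _ n ih =>
    intro bag base m K answer hn hperm hb hm hJ1 hJ2
    have hlen : bag.length = base.length + m.length := by
      simpa [List.length_append] using hperm.length_eq
    by_cases hbig : bag.length > 2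
    · have hne : ¬(base = [] ∧ m = []) := by
        rintro ⟨rfl, rfl⟩
        simp only [List.length_nil, Nat.add_zero] at hlen
        omega
      rcases hE1 : pvFrontPop base m with ⟨a, b1, m1⟩
      have hv1 : (pvPopMin bag).1 = a :=
        pop_value_eq bag base m a b1 m1 hE1 hperm hne hb hm
      have hp1 : (pvPopMin bag).2.Perm (b1 ++ m1) :=
        pop_rest_perm bag base m a b1 m1 hE1 hperm hne hb hm
      have hc1 : (base = a :: b1 ∧ m1 = m) ∨ (m = a :: m1 ∧ b1 = base) := by
        have := pvFrontPop_cases base m hne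
        rw [hE1] at this
        simpa using this
      have hmem1 : a ∈ base ++ m := by
        rcases hc1 with ⟨hbb, _⟩ | ⟨hmm, _⟩
        · exact List.mem_append.mpr (Or.inl (by rw [hbb]; simp))
        · exact List.mem_append.mpr (Or.inr (by rw [hmm]; simp))
      have hmin1 : ∀ y ∈ base ++ m, a ≤ y := by
        have := pvFrontPop_isMin base m hb hm
        rw [hE1] at this
        exact this
      by_cases hK1 : a < K
      · -- a combining step on both sides
        have hanyT : bag.any (fun num => num < K) = true :=
          any_lt_of_mem bag K a (hperm.mem_iff.mpr hmem1) hK1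
        have hb1S : b1.Pairwise (· ≤ ·) := by
          rcases hc1 with ⟨hbb, _⟩ | ⟨_, hbb⟩
          · rw [hbb] at hb; exact (List.pairwise_cons.mp hb).2
          · rw [hbb]; exact hb
        have hm1S : m1.Pairwise (· ≤ ·) := by
          rcases hc1 with ⟨_, hmm⟩ | ⟨hmm, _⟩
          · rw [hmm]; exact hm
          · rw [hmm] at hm; exact (List.pairwise_cons.mp hm).2
        have hm1J2 : m1.Pairwise (fun p q => q ≤ 3 * p) := by
          rcases hc1 with ⟨_, hmm⟩ | ⟨hmm, _⟩
          · rw [hmm]; exact hJ2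
          · rw [hmm] at hJ2; exact (List.pairwise_cons.mp hJ2).2
        have hsub1 : ∀ x, x ∈ b1 ++ m1 → x ∈ base ++ m := by
          intro x hx
          rcases hc1 with ⟨hbb, hmm⟩ | ⟨hmm, hbb⟩
          · rcases List.mem_append.mp hx with h' | h'
            · exact List.mem_append.mpr (Or.inl (by rw [hbb]; exact List.mem_cons_of_mem _ h'))
            · exact List.mem_append.mpr (Or.inr (by rw [← hmm]; exact h'))
          · rcases List.mem_append.mp hx with h' | h'
            · exact List.mem_append.mpr (Or.inl (by rw [← hbb]; exact h'))
            · exact List.mem_append.mpr (Or.inr (by rw [hmm]; exact List.mem_cons_of_mem _ h'))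
        have hbagne : bag ≠ [] := by intro h; subst h; simp at hbig
        have e1 := pvPopMin_length bag hbagne
        have hne1 : ¬(b1 = [] ∧ m1 = []) := by
          rintro ⟨h1, h2⟩
          have hl := hp1.length_eq
          rw [h1, h2] at hl
          simp only [List.append_nil, List.length_nil] at hl
          omega
        rcases hE2 : pvFrontPop b1 m1 with ⟨b, b2, m2⟩
        have hv2 : (pvPopMin (pvPopMin bag).2).1 = b :=
          pop_value_eq (pvPopMin bag).2 b1 m1 b b2 m2 hE2 hp1 hne1 hb1S hm1S
        have hp2 : (pvPopMin (pvPopMin bag).2).2.Perm (b2 ++ m2) :=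
          pop_rest_perm (pvPopMin bag).2 b1 m1 b b2 m2 hE2 hp1 hne1 hb1S hm1S
        have hc2 : (b1 = b :: b2 ∧ m2 = m1) ∨ (m1 = b :: m2 ∧ b2 = b1) := by
          have := pvFrontPop_cases b1 m1 hne1
          rw [hE2] at this
          simpa using this
        have hmem2 : b ∈ b1 ++ m1 := by
          rcases hc2 with ⟨hbb, _⟩ | ⟨hmm, _⟩
          · exact List.mem_append.mpr (Or.inl (by rw [hbb]; simp))
          · exact List.mem_append.mpr (Or.inr (by rw [hmm]; simp))
        have hmin2 : ∀ y ∈ b1 ++ m1, b ≤ y := by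
          have := pvFrontPop_isMin b1 m1 hb1S hm1S
          rw [hE2] at this
          exact this
        have hsub2 : ∀ x, x ∈ b2 ++ m2 → x ∈ b1 ++ m1 := by
          intro x hx
          rcases hc2 with ⟨hbb, hmm⟩ | ⟨hmm, hbb⟩
          · rcases List.mem_append.mp hx with h' | h'
            · exact List.mem_append.mpr (Or.inl (by rw [hbb]; exact List.mem_cons_of_mem _ h'))
            · exact List.mem_append.mpr (Or.inr (by rw [← hmm]; exact h'))
          · rcases List.mem_append.mp hx with h' | h'
            · exact List.mem_append.mpr (Or.inl (by rw [← hbb]; exact h'))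
            · exact List.mem_append.mpr (Or.inr (by rw [hmm]; exact List.mem_cons_of_mem _ h'))
        have hab : a ≤ b := hmin1 b (hsub1 b hmem2)
        have hbelow : ∀ y ∈ b2 ++ m2, b ≤ y := fun y hy => hmin2 y (hsub2 y hy)
        have hm2_in_m1 : ∀ x ∈ m2, x ∈ m1 := by
          intro x hx
          rcases hc2 with ⟨_, hmm⟩ | ⟨hmm, _⟩
          · rw [← hmm]; exact hx
          · rw [hmm]; exact List.mem_cons_of_mem _ hx
        have hm1_in_m : ∀ x ∈ m1, x ∈ m := by
          intro x hx
          rcases hc1 with ⟨_, hmm⟩ | ⟨hmm, _⟩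
          · rw [← hmm]; exact hx
          · rw [hmm]; exact List.mem_cons_of_mem _ hx
        have hb2_in_b1 : ∀ y ∈ b2, y ∈ b1 := by
          intro y hy
          rcases hc2 with ⟨hbb, _⟩ | ⟨_, hbb⟩
          · rw [hbb]; exact List.mem_cons_of_mem _ hy
          · rw [← hbb]; exact hy
        have hb1_in_b : ∀ y ∈ b1, y ∈ base := by
          intro y hy
          rcases hc1 with ⟨hbb, _⟩ | ⟨_, hbb⟩
          · rw [hbb]; exact List.mem_cons_of_mem _ hy
          · rw [← hbb]; exact hy
        -- every surviving merged value is ≤ 3·a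
        have hm2_le3a : ∀ x ∈ m2, x ≤ 3 * a := by
          intro x hx
          rcases hc1 with ⟨hbb, hmm⟩ | ⟨hmm, _⟩
          · -- first popped from base
            have hamem : a ∈ base := by rw [hbb]; simp
            exact hJ1 x (hm1_in_m x (hm2_in_m1 x hx)) a hamem
          · -- first popped from merged: m = a :: m1
            have h3 : ∀ x' ∈ m1, x' ≤ 3 * a := by
              rw [hmm] at hJ2
              exact (List.pairwise_cons.mp hJ2).1
            exact h3 x (hm2_in_m1 x hx)
        -- new-state invariants
        have hm2_sorted : m2.Pairwise (· ≤ ·) := by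
          rcases hc2 with ⟨_, hmm⟩ | ⟨hmm, _⟩
          · rw [← hmm] at hm1S; exact hm1S
          · rw [hmm] at hm1S; exact (List.pairwise_cons.mp hm1S).2
        have hb2_sorted : b2.Pairwise (· ≤ ·) := by
          rcases hc2 with ⟨hbb, _⟩ | ⟨_, hbb⟩
          · rw [hbb] at hb1S; exact (List.pairwise_cons.mp hb1S).2
          · rw [hbb]; exact hb1S
        have hm2J2 : m2.Pairwise (fun p q => q ≤ 3 * p) := by
          rcases hc2 with ⟨_, hmm⟩ | ⟨hmm, _⟩
          · rw [← hmm] at hm1J2; exact hm1J2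
          · rw [hmm] at hm1J2; exact (List.pairwise_cons.mp hm1J2).2
        have hvSorted : (m2 ++ [a + b * 2]).Pairwise (· ≤ ·) := by
          refine List.pairwise_append.mpr ⟨hm2_sorted, by simp, ?_⟩
          intro x hx y hy
          have hy' : y = a + b * 2 := by simpa using hy
          have := hm2_le3a x hx
          omega
        have hvJ1 : ∀ x ∈ m2 ++ [a + b * 2], ∀ y ∈ b2, x ≤ 3 * y := by
          intro x hx y hy
          rcases List.mem_append.mp hx with hx' | hx'
          · exact hJ1 x (hm1_in_m x (hm2_in_m1 x hx')) y (hb1_in_b y (hb2_in_b1 y hy))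
          · have hx'' : x = a + b * 2 := by simpa using hx'
            have h1 : b ≤ y := hbelow y (List.mem_append.mpr (Or.inl hy))
            have h2 : a ≤ y := le_trans hab h1
            omega
        have hvJ2 : (m2 ++ [a + b * 2]).Pairwise (fun p q => q ≤ 3 * p) := by
          refine List.pairwise_append.mpr ⟨hm2J2, by simp, ?_⟩
          intro x hx y hy
          have hy' : y = a + b * 2 := by simpa using hy
          have h1 : b ≤ x := hbelow x (List.mem_append.mpr (Or.inr hx))
          have h2 : a ≤ x := le_trans hab h1
          omega
        have hpermnew : ((pvPopMin (pvPopMin bag).2).2 ++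
            [(pvPopMin bag).1 + (pvPopMin (pvPopMin bag).2).1 * 2]).Perm
            (b2 ++ (m2 ++ [a + b * 2])) := by
          rw [hv1, hv2]
          have := hp2.append_right [a + b * 2]
          rw [List.append_assoc] at this
          exact this
        have hlennew : ((pvPopMin (pvPopMin bag).2).2 ++
            [(pvPopMin bag).1 + (pvPopMin (pvPopMin bag).2).1 * 2]).length < n := by
          have hne1' : (pvPopMin bag).2 ≠ [] := by
            intro h'
            rw [h'] at e1
            simp only [List.length_nil] at e1
            omega
          have e2 := pvPopMin_length (pvPopMin bag).2 hne1'
          simp only [List.length_append, List.length_cons, List.length_nil]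
          omega
        rw [solutionLoop_step bag K answer hbig hanyT]
        rw [solutionAltLoop_step base m K answer (by omega) (by rw [hE1]; exact hK1)]
        simp only [hE1, hE2]
        exact ih _ hlennew _ _ _ K (answer + 1) rfl hpermnew hb2_sorted hvSorted hvJ1 hvJ2
      · -- minimum already ≥ K: both sides return 'answer'
        have hanyF : bag.any (fun num => num < K) = false :=
          any_lt_false bag K a (fun y hy => hmin1 y (hperm.mem_iff.mp hy)) hK1
        rw [solutionLoop_exit bag K answer hbig hanyF]
        rw [solutionAltLoop_exit base m K answer (by rw [hE1]; exact hK1)]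
        cases hminO : PySem.List.min? (base ++ m) (fun x => x) with
        | none =>
          rw [pvAltFinal_none base m K answer hminO]
        | some mn =>
          rw [pvAltFinal_some base m K answer mn hminO]
          have hmnmem := PySem.List.min?_mem hminO
          have : a ≤ mn := hmin1 mn hmnmem
          rw [if_neg (by omega)]
    · -- at most two elements remain: A's final scan vs Source B's rest/min check
      rw [solutionLoop_final bag K answer hbig]
      rw [solutionAltLoop_final base m K answer (by omega)]
      cases hminO : PySem.List.min? (base ++ m) (fun x => x) with
      | none =>
        rw [pvAltFinal_none base m K answer hminO]
        have hrest : base ++ m = [] := (PySem.List.min?_eq_none_iff _ _).mp hminO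
        have hbagnil : bag = [] := (hrest ▸ hperm).eq_nil
        rw [hbagnil]
        simp
      | some mn =>
        rw [pvAltFinal_some base m K answer mn hminO]
        have hmnmem := PySem.List.min?_mem hminO
        by_cases hmnK : mn < K
        · rw [if_pos hmnK]
          rw [any_lt_of_mem bag K mn (hperm.mem_iff.mpr hmnmem) hmnK]
          simp
        · rw [if_neg hmnK]
          have hmnmin : ∀ y ∈ bag, mn ≤ y := fun y hy =>
            PySem.List.min?_isMin hminO y (hperm.mem_iff.mp hy)
          rw [any_lt_false bag K mn hmnmin hmnK]
          simp

theorem foldl_push (l acc : List Int) :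
    l.foldl (fun h num => h ++ [num]) acc = acc ++ l := by
  induction l generalizing acc with
  | nil => simp
  | cons x xs ih => simp [List.foldl_cons, ih]

-- ===== VERDICT (by name: the statement is the Claim_ definition above) =====
theorem solution_spec : Claim_equal_solution := by
  intro scoville K _
  unfold Spec_solution solution solution_alt
  rw [foldl_push]
  simp only [List.nil_append]
  exact loop_eq scoville.length scoville _ [] K 0 rfl
    (by simpa using (PySem.List.sorted_perm scoville (fun x => x) false).symm)
    (PySem.List.sorted_pairwise scoville (fun x => x))
    (by simp)
    (by simp)
    (by simp)
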